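-- pv_equiv track=rewrite | github.com/jingchengsimon/NeuronWithNetworkx | cell_with_networkx.py | _distance_synapse_mark_compare
-- ===== SOURCE A (Python) =====
-- def _distance_synapse_mark_compare(dis_syn_from_ctr, dis_mark_from_ctr):
--     # 创建一个包含原始索引的列表
--     original_indices = list(range(len(dis_syn_from_ctr)))
--     index = []
--
--     for value in dis_mark_from_ctr:
--         # 计算与value差值最小的元素的索引
--         min_index = min(original_indices, key=lambda i: abs(dis_syn_from_ctr[i] - value))
--         # 将该索引加入结果列表，并从original_indices中移除
--         index.append(min_index)
--         original_indices.remove(min_index)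
--
--     return index
-- ===== SOURCE B (Python) =====
-- import bisect
--
-- def _distance_synapse_mark_compare(dis_syn_from_ctr, dis_mark_from_ctr):
--     # Sort (value, index) pairs once; for each mark, binary-search the nearest
--     # remaining value (ties at equal distance broken by smallest original index,
--     # which within a run of equal values is the run's first entry).
--     pairs = sorted((v, i) for i, v in enumerate(dis_syn_from_ctr))
--     vals = [v for v, _ in pairs]
--     idxs = [i for _, i in pairs]
--     out = []
--     for x in dis_mark_from_ctr:
--         p = bisect.bisect_left(vals, x)
--         if p == len(vals):
--             pos = bisect.bisect_left(vals, vals[-1])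
--         elif p == 0:
--             pos = 0
--         else:
--             q = bisect.bisect_left(vals, vals[p - 1])
--             d_left = x - vals[q]
--             d_right = vals[p] - x
--             if d_left < d_right or (d_left == d_right and idxs[q] < idxs[p]):
--                 pos = q
--             else:
--                 pos = p
--         out.append(idxs[pos])
--         del vals[pos]
--         del idxs[pos]
--     return out
-- ===== Notes on version B (the rewrite author's own statement) =====
-- stated objective: faster
-- what changed: A rescans all remaining indices with min(key=abs distance) for every mark (O(m*n)); B sorts (value, index) pairs once and finds each mark's nearest remaining value by bisect_left on a sorted list (run starts resolve ties toward the smallest original index), then deletes the used entry.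
import Mathlib
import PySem

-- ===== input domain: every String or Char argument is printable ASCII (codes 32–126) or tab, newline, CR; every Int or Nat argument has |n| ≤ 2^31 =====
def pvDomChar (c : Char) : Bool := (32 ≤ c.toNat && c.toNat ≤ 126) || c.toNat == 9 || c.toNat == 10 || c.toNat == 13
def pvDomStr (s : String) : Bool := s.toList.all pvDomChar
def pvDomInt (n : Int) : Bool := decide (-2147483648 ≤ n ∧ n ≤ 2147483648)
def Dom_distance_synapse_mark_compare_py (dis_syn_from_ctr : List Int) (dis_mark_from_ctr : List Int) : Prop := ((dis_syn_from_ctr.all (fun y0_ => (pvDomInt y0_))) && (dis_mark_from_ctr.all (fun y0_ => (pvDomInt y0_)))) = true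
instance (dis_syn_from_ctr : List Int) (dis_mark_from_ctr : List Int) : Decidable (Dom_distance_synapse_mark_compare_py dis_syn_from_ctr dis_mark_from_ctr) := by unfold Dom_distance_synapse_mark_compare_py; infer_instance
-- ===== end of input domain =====

-- B replaces A's per-mark linear scan over the remaining indices by one sort of (value, index)
-- pairs plus a bisect-based nearest-value search with deletion (objective: faster).

-- ===== PORT A =====
-- literal transliteration of _distance_synapse_mark_compare: keep the remaining original
-- indices, and for each mark take min(..., key=abs distance), append it, remove it.
def distance_synapse_mark_compare_py (dis_syn_from_ctr : List Int) (dis_mark_from_ctr : List Int) : List Int :=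
  let original_indices := PySem.List.pyRange 0 (dis_syn_from_ctr.length : Int) 1
  (dis_mark_from_ctr.foldl
    (fun (st : List Int × List Int) value =>
      match PySem.List.min? st.1 (fun i => |PySem.List.pyGetD dis_syn_from_ctr i 0 - value|) with
      | none => st   -- Python raises ValueError (min of empty) here; excluded by Pre_
      | some min_index =>
        ((PySem.List.remove? st.1 min_index).getD st.1, st.2 ++ [min_index]))
    (original_indices, [])).2

-- ===== PORT B =====
-- literal transliteration of Source B: sorted (value, index) pairs, parallel vals/idxs lists,
-- bisect_left for the insertion point, run starts for tie-breaking, del vals[pos]/idxs[pos].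
def distance_synapse_mark_compare_py_alt (dis_syn_from_ctr : List Int) (dis_mark_from_ctr : List Int) : List Int :=
  let pairs := PySem.List.sorted2 ((PySem.List.enumerate dis_syn_from_ctr).map (fun p => (p.2, p.1))) (fun t => t.1) (fun t => t.2)
  let vals0 := pairs.map (fun t => t.1)
  let idxs0 := pairs.map (fun t => t.2)
  (dis_mark_from_ctr.foldl
    (fun (st : List Int × List Int × List Int) x =>
      let vals := st.1
      let idxs := st.2.1
      let p := PySem.List.bisectLeft vals x
      let pos :=
        if p = vals.length then PySem.List.bisectLeft vals (PySem.List.pyGetD vals (-1) 0)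
        else if p = 0 then 0
        else
          let q := PySem.List.bisectLeft vals (vals.getD (p - 1) 0)
          let dL := x - vals.getD q 0
          let dR := vals.getD p 0 - x
          if dL < dR ∨ (dL = dR ∧ idxs.getD q 0 < idxs.getD p 0) then q else p
      (vals.eraseIdx pos, idxs.eraseIdx pos, st.2.2 ++ [idxs.getD pos 0]))
    (vals0, idxs0, [])).2.2

-- ===== PRECONDITION & SPEC =====
-- Pre_ excludes exactly the inputs where Python A raises ValueError (min() of an empty
-- sequence, reached iff there are more marks than synapses); B also raises there.
def Pre_distance_synapse_mark_compare_py (dis_syn_from_ctr : List Int) (dis_mark_from_ctr : List Int) : Prop :=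
  dis_mark_from_ctr.length ≤ dis_syn_from_ctr.length
instance (dis_syn_from_ctr : List Int) (dis_mark_from_ctr : List Int) : Decidable (Pre_distance_synapse_mark_compare_py dis_syn_from_ctr dis_mark_from_ctr) := by unfold Pre_distance_synapse_mark_compare_py; infer_instance
def pvWitness_distance_synapse_mark_compare_py : List Int × List Int := ([3, -1, 4], [0, 4])
def Spec_distance_synapse_mark_compare_py (dis_syn_from_ctr : List Int) (dis_mark_from_ctr : List Int) (out : List Int) : Prop := out = distance_synapse_mark_compare_py_alt dis_syn_from_ctr dis_mark_from_ctr
instance (dis_syn_from_ctr : List Int) (dis_mark_from_ctr : List Int) (out : List Int) : Decidable (Spec_distance_synapse_mark_compare_py dis_syn_from_ctr dis_mark_from_ctr out) := by unfold Spec_distance_synapse_mark_compare_py; infer_instance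

-- ===== CLAIM (what is proved, stated in full; the proofs are below) =====
def Claim_equal_distance_synapse_mark_compare_py : Prop := ∀ (dis_syn_from_ctr : List Int) (dis_mark_from_ctr : List Int), Dom_distance_synapse_mark_compare_py dis_syn_from_ctr dis_mark_from_ctr → Pre_distance_synapse_mark_compare_py dis_syn_from_ctr dis_mark_from_ctr → Spec_distance_synapse_mark_compare_py dis_syn_from_ctr dis_mark_from_ctr (distance_synapse_mark_compare_py dis_syn_from_ctr dis_mark_from_ctr)

-- ===== LEMMAS AND PROOFS =====

-- dis_syn_from_ctr[i] as both programs read it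
def pvG (syn : List Int) (i : Int) : Int := PySem.List.pyGetD syn i 0

-- B's position computation for one mark (exactly the expression in the port's loop body)
def pvPos (vals idxs : List Int) (x : Int) : Nat :=
  if PySem.List.bisectLeft vals x = vals.length then PySem.List.bisectLeft vals (PySem.List.pyGetD vals (-1) 0)
  else if PySem.List.bisectLeft vals x = 0 then 0
  else
    let p := PySem.List.bisectLeft vals x
    let q := PySem.List.bisectLeft vals (vals.getD (p - 1) 0)
    let dL := x - vals.getD q 0
    let dR := vals.getD p 0 - x
    if dL < dR ∨ (dL = dR ∧ idxs.getD q 0 < idxs.getD p 0) then q else p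

-- The joint loop invariant: S is A's remaining ascending index list; vals/idxs are B's
-- parallel lists, lexicographically sorted pairs (value, index) of exactly the indices in S.
def pvInv (syn S vals idxs : List Int) : Prop :=
  idxs.length = vals.length ∧ S.length = vals.length ∧ S.Pairwise (· < ·) ∧
  (∀ k, k < vals.length → idxs.getD k 0 ∈ S ∧ vals.getD k 0 = pvG syn (idxs.getD k 0)) ∧
  (∀ i ∈ S, ∃ k, k < vals.length ∧ idxs.getD k 0 = i) ∧
  (∀ j k, j < k → k < vals.length →
    vals.getD j 0 < vals.getD k 0 ∨ (vals.getD j 0 = vals.getD k 0 ∧ idxs.getD j 0 < idxs.getD k 0))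

lemma pvInv_vals_sorted {syn S vals idxs : List Int} (h : pvInv syn S vals idxs) :
    vals.Pairwise (· ≤ ·) := by
  obtain ⟨-, -, -, -, -, hlex⟩ := h
  rw [List.pairwise_iff_getElem]
  intro i j hi hj hij
  have := hlex i j hij hj
  rw [List.getD_eq_getElem vals 0 hi, List.getD_eq_getElem vals 0 hj] at this
  rcases this with h' | ⟨h', -⟩ <;> omega

lemma pv_min?_cons (key : Int → Int) : ∀ (t : List Int) (a : Int),
    PySem.List.min? (a :: t) key = some (t.foldl (fun m y => if key y < key m then y else m) a) := by
  intro t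
  induction t with
  | nil => intro a; rfl
  | cons y t ih =>
    intro a
    by_cases h : key y < key a
    · have h1 : PySem.List.min? (a :: y :: t) key = PySem.List.min? (y :: t) key := by
        simp [PySem.List.min?, List.foldl_cons, h]
      rw [h1, ih, List.foldl_cons, if_pos h]
    · have h1 : PySem.List.min? (a :: y :: t) key = PySem.List.min? (a :: t) key := by
        simp [PySem.List.min?, List.foldl_cons, h]
      rw [h1, ih, List.foldl_cons, if_neg h]

lemma pv_foldl_min_lex (key : Int → Int) : ∀ (t : List Int) (a : Int), ((a :: t).Pairwise (· < ·)) →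
    (t.foldl (fun m y => if key y < key m then y else m) a = a ∨
      t.foldl (fun m y => if key y < key m then y else m) a ∈ t) ∧
    (∀ y, (y = a ∨ y ∈ t) →
      key (t.foldl (fun m y => if key y < key m then y else m) a) < key y ∨
      (key (t.foldl (fun m y => if key y < key m then y else m) a) = key y ∧
        t.foldl (fun m y => if key y < key m then y else m) a ≤ y)) := by
  intro t
  induction t with
  | nil =>
    intro a _
    refine ⟨Or.inl rfl, ?_⟩
    rintro y (rfl | h)
    · right; exact ⟨rfl, le_refl _⟩
    · simp at h
  | cons y t ih =>
    intro a hp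
    have hay : a < y := (List.pairwise_cons.1 hp).1 y (by simp)
    have hat : ∀ z ∈ t, a < z := fun z hz => (List.pairwise_cons.1 hp).1 z (by simp [hz])
    have hyt : (y :: t).Pairwise (· < ·) := (List.pairwise_cons.1 hp).2
    simp only [List.foldl_cons]
    by_cases hc : key y < key a
    · -- new accumulator is y
      simp only [if_pos hc]
      have hp' : (y :: t).Pairwise (· < ·) := hyt
      obtain ⟨hmem, hall⟩ := ih y hp'
      refine ⟨?_, ?_⟩
      · rcases hmem with h' | h' <;> simp [h']
      · intro z hz
        rcases hz with rfl | hz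
        · rcases hall y (Or.inl rfl) with h' | ⟨h', -⟩ <;> [left; left] <;> omega
        · rcases List.mem_cons.1 hz with rfl | hz
          · exact hall z (Or.inl rfl)
          · exact hall z (Or.inr hz)
    · -- accumulator stays a
      simp only [if_neg hc]
      have hka : key a ≤ key y := by omega
      have hp' : (a :: t).Pairwise (· < ·) := by
        rw [List.pairwise_cons]
        exact ⟨hat, (List.pairwise_cons.1 hyt).2⟩
      obtain ⟨hmem, hall⟩ := ih a hp'
      refine ⟨?_, ?_⟩
      · rcases hmem with h' | h' <;> simp [h']
      · intro z hz
        rcases hz with rfl | hz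
        · exact hall z (Or.inl rfl)
        · rcases List.mem_cons.1 hz with rfl | hz
          · rcases hall a (Or.inl rfl) with h' | ⟨h', hra⟩
            · left; omega
            · by_cases hk : key (t.foldl (fun m y => if key y < key m then y else m) a) < key z
              · left; exact hk
              · right
                constructor
                · omega
                · omega
          · exact hall z (Or.inr hz)

-- min(xs, key) returns the FIRST minimiser; on an ascending list that is the
-- lexicographic minimum of (key i, i).
lemma pv_min?_lex {S : List Int} {key : Int → Int} {m : Int}
    (hs : S.Pairwise (· < ·)) (h : PySem.List.min? S key = some m) :
    m ∈ S ∧ ∀ i ∈ S, key m < key i ∨ (key m = key i ∧ m ≤ i) := by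
  rcases S with _ | ⟨s, t⟩
  · simp [PySem.List.min?] at h
  · rw [pv_min?_cons] at h
    have hm : m = t.foldl (fun m y => if key y < key m then y else m) s := by
      exact (Option.some_injective _ h).symm
    have := pv_foldl_min_lex key t s hs
    rw [← hm] at this
    obtain ⟨hmem, hall⟩ := this
    refine ⟨?_, ?_⟩
    · rcases hmem with h' | h' <;> simp [h']
    · intro i hi
      exact hall i (by rcases List.mem_cons.1 hi with h' | h' <;> [left; right] <;> exact h')

-- bisect_left's characterisation, in getD form
lemma pv_bisect_getD {vals : List Int} (hsort : vals.Pairwise (· ≤ ·)) (x : Int) :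
    PySem.List.bisectLeft vals x ≤ vals.length ∧
    (∀ j, j < PySem.List.bisectLeft vals x → j < vals.length → vals.getD j 0 < x) ∧
    (∀ j, PySem.List.bisectLeft vals x ≤ j → j < vals.length → x ≤ vals.getD j 0) := by
  obtain ⟨h1, h2, h3⟩ := PySem.List.bisectLeft_spec vals x hsort
  refine ⟨h1, ?_, ?_⟩ <;> intro j hj hj' <;> rw [List.getD_eq_getElem _ _ hj']
  · exact h2 j hj' hj
  · exact h3 j hj' hj

-- B's chosen position is the lexicographic minimiser of (|vals[k]-x|, idxs[k]).
lemma pv_posB_spec (syn S vals idxs : List Int) (x : Int) (pos : Nat)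
    (h : pvInv syn S vals idxs) (hne : vals ≠ [])
    (hpos : pos =
      (if PySem.List.bisectLeft vals x = vals.length then
         PySem.List.bisectLeft vals (PySem.List.pyGetD vals (-1) 0)
       else if PySem.List.bisectLeft vals x = 0 then 0
       else
         let p := PySem.List.bisectLeft vals x
         let q := PySem.List.bisectLeft vals (vals.getD (p - 1) 0)
         let dL := x - vals.getD q 0
         let dR := vals.getD p 0 - x
         if dL < dR ∨ (dL = dR ∧ idxs.getD q 0 < idxs.getD p 0) then q else p)) :
    pos < vals.length ∧
    ∀ k, k < vals.length →
      |vals.getD pos 0 - x| < |vals.getD k 0 - x| ∨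
        (|vals.getD pos 0 - x| = |vals.getD k 0 - x| ∧ idxs.getD pos 0 ≤ idxs.getD k 0) := by
  have hsort := pvInv_vals_sorted h
  obtain ⟨hlen, hSlen, hSp, hfwd, honto, hlex⟩ := h
  have hn : 0 < vals.length := List.length_pos_iff.2 hne
  have hmono : ∀ j k, j ≤ k → k < vals.length → vals.getD j 0 ≤ vals.getD k 0 := by
    intro j k hjk hk
    rcases Nat.eq_or_lt_of_le hjk with rfl | h'
    · exact le_refl _
    · rcases hlex j k h' hk with h'' | ⟨h'', -⟩ <;> omega
  have hidx : ∀ j k, j ≤ k → k < vals.length → vals.getD j 0 = vals.getD k 0 →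
      idxs.getD j 0 ≤ idxs.getD k 0 := by
    intro j k hjk hk hv
    rcases Nat.eq_or_lt_of_le hjk with rfl | h'
    · exact le_refl _
    · rcases hlex j k h' hk with h'' | ⟨-, h''⟩ <;> omega
  obtain ⟨hp_le, hp_lt, hp_ge⟩ := pv_bisect_getD hsort x
  by_cases hpn : PySem.List.bisectLeft vals x = vals.length
  · -- every remaining value is < x; take the first entry of the last run
    have hlast : PySem.List.pyGetD vals (-1) 0 = vals.getD (vals.length - 1) 0 := by
      rw [PySem.List.pyGetD_neg_one vals 0 hne, List.getLast_eq_getElem,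
        List.getD_eq_getElem _ _ (by omega)]
    rw [if_pos hpn, hlast] at hpos
    obtain ⟨hq_le, hq_lt, hq_ge⟩ := pv_bisect_getD hsort (vals.getD (vals.length - 1) 0)
    have hqle : pos ≤ vals.length - 1 := by
      by_contra h'
      have := hq_lt (vals.length - 1) (by omega) (by omega)
      omega
    have hposlt : pos < vals.length := by omega
    have hvq : vals.getD pos 0 = vals.getD (vals.length - 1) 0 := by
      have := hq_ge pos (le_of_eq hpos.symm) hposlt
      have := hmono pos (vals.length - 1) hqle (by omega)
      omega
    refine ⟨hposlt, ?_⟩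
    intro k hk
    have hkx : vals.getD k 0 < x := hp_lt k (by omega) hk
    have hpx : vals.getD pos 0 < x := hp_lt pos (by omega) hposlt
    have ep : |vals.getD pos 0 - x| = x - vals.getD pos 0 := by rw [abs_of_neg (by omega)]; ring
    have ek : |vals.getD k 0 - x| = x - vals.getD k 0 := by rw [abs_of_neg (by omega)]; ring
    rw [ep, ek]
    by_cases hkq : k < pos
    · left
      have := hq_lt k (by omega) hk
      omega
    · have h1 : vals.getD pos 0 ≤ vals.getD k 0 := hmono pos k (by omega) hk
      have h2 : vals.getD k 0 ≤ vals.getD (vals.length - 1) 0 := hmono k (vals.length - 1) (by omega) (by omega)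
      right
      refine ⟨by omega, hidx pos k (by omega) hk (by omega)⟩
  · by_cases hp0 : PySem.List.bisectLeft vals x = 0
    · -- every remaining value is ≥ x; take the first entry
      rw [if_neg hpn, if_pos hp0] at hpos
      refine ⟨by omega, ?_⟩
      intro k hk
      have hkx : x ≤ vals.getD k 0 := hp_ge k (by omega) hk
      have hpx : x ≤ vals.getD pos 0 := hp_ge pos (by omega) (by omega)
      have ep : |vals.getD pos 0 - x| = vals.getD pos 0 - x := by rw [abs_of_nonneg (by omega)]
      have ek : |vals.getD k 0 - x| = vals.getD k 0 - x := by rw [abs_of_nonneg (by omega)]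
      rw [ep, ek]
      have h1 : vals.getD pos 0 ≤ vals.getD k 0 := hmono pos k (by omega) hk
      by_cases he : vals.getD pos 0 = vals.getD k 0
      · right; exact ⟨by omega, hidx pos k (by omega) hk he⟩
      · left; omega
    · -- a value below x and a value at/above x both remain
      rw [if_neg hpn, if_neg hp0] at hpos
      simp only [] at hpos
      have hplt : PySem.List.bisectLeft vals x < vals.length := by
        have := hp_le; omega
      have hp1 : PySem.List.bisectLeft vals x - 1 < vals.length := by omega
      obtain ⟨hq_le, hq_lt, hq_ge⟩ :=
        pv_bisect_getD hsort (vals.getD (PySem.List.bisectLeft vals x - 1) 0)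
      set p := PySem.List.bisectLeft vals x with hpdef
      set q := PySem.List.bisectLeft vals (vals.getD (p - 1) 0) with hqdef
      have hqp : q ≤ p - 1 := by
        by_contra h'
        have := hq_lt (p - 1) (by omega) hp1
        omega
      have hvq : vals.getD q 0 = vals.getD (p - 1) 0 := by
        have := hq_ge q (le_refl _) (by omega)
        have := hmono q (p - 1) hqp hp1
        omega
      have hvLx : vals.getD (p - 1) 0 < x := hp_lt (p - 1) (by omega) hp1
      have hvRx : x ≤ vals.getD p 0 := hp_ge p (le_refl _) hplt
      -- facts about every position
      have hbelow : ∀ k, k < p → vals.getD k 0 ≤ vals.getD (p - 1) 0 ∧ vals.getD k 0 < x := by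
        intro k hkp
        exact ⟨hmono k (p - 1) (by omega) hp1, hp_lt k hkp (by omega)⟩
      have habove : ∀ k, p ≤ k → k < vals.length → vals.getD p 0 ≤ vals.getD k 0 ∧ x ≤ vals.getD k 0 := by
        intro k hpk hk
        exact ⟨hmono p k hpk hk, hp_ge k hpk hk⟩
      by_cases hcond : x - vals.getD q 0 < vals.getD p 0 - x ∨
          (x - vals.getD q 0 = vals.getD p 0 - x ∧ idxs.getD q 0 < idxs.getD p 0)
      · rw [if_pos hcond] at hpos
        subst hpos
        refine ⟨by omega, ?_⟩
        intro k hk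
        have ep : |vals.getD q 0 - x| = x - vals.getD q 0 := by rw [abs_of_neg (by omega)]; ring
        rw [ep]
        by_cases hkp : k < p
        · obtain ⟨hk1, hk2⟩ := hbelow k hkp
          have ek : |vals.getD k 0 - x| = x - vals.getD k 0 := by rw [abs_of_neg (by omega)]; ring
          rw [ek]
          by_cases hkq : k < q
          · left; have := hq_lt k hkq hk; omega
          · right
            have := hq_ge k (by omega) hk
            refine ⟨by omega, hidx q k (by omega) hk (by omega)⟩
        · obtain ⟨hk1, hk2⟩ := habove k (by omega) hk
          have ek : |vals.getD k 0 - x| = vals.getD k 0 - x := by rw [abs_of_nonneg (by omega)]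
          rw [ek]
          rcases hcond with hlt | ⟨heq, hiq⟩
          · left; omega
          · by_cases hke : vals.getD k 0 = vals.getD p 0
            · right
              have : idxs.getD p 0 ≤ idxs.getD k 0 := hidx p k (by omega) hk hke.symm
              exact ⟨by omega, by omega⟩
            · left; omega
      · rw [if_neg hcond] at hpos
        subst hpos
        push Not at hcond
        obtain ⟨hge, himp⟩ := hcond
        refine ⟨hplt, ?_⟩
        intro k hk
        have ep : |vals.getD p 0 - x| = vals.getD p 0 - x := by rw [abs_of_nonneg (by omega)]
        rw [ep]
        by_cases hkp : k < p
        · obtain ⟨hk1, hk2⟩ := hbelow k hkp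
          have ek : |vals.getD k 0 - x| = x - vals.getD k 0 := by rw [abs_of_neg (by omega)]; ring
          rw [ek]
          by_cases hkq : k < q
          · left; have := hq_lt k hkq hk; omega
          · have hqk : vals.getD q 0 = vals.getD k 0 := by
              have := hq_ge k (by omega) hk
              omega
            by_cases hde : x - vals.getD q 0 = vals.getD p 0 - x
            · right
              have h1 : idxs.getD p 0 ≤ idxs.getD q 0 := himp hde
              have h2 : idxs.getD q 0 ≤ idxs.getD k 0 := hidx q k (by omega) hk hqk
              exact ⟨by omega, by omega⟩
            · left; omega
        · obtain ⟨hk1, hk2⟩ := habove k (by omega) hk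
          have ek : |vals.getD k 0 - x| = vals.getD k 0 - x := by rw [abs_of_nonneg (by omega)]
          rw [ek]
          by_cases hke : vals.getD k 0 = vals.getD p 0
          · right; exact ⟨by omega, hidx p k (by omega) hk hke.symm⟩
          · left; omega

lemma pvInv_preserved (syn S vals idxs : List Int) (pos : Nat)
    (h : pvInv syn S vals idxs) (hpos : pos < vals.length) :
    pvInv syn (S.erase (idxs.getD pos 0)) (vals.eraseIdx pos) (idxs.eraseIdx pos) := by
  obtain ⟨hlen, hSlen, hSp, hfwd, honto, hlex⟩ := h
  have hnd : S.Nodup := hSp.imp (fun h => ne_of_lt h)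
  have hm : idxs.getD pos 0 ∈ S := (hfwd pos hpos).1
  have hinj : ∀ j k, j < vals.length → k < vals.length → idxs.getD j 0 = idxs.getD k 0 → j = k := by
    intro j k hj hk he
    rcases Nat.lt_trichotomy j k with h' | h' | h'
    · rcases hlex j k h' hk with h'' | ⟨-, h''⟩
      · have e1 := (hfwd j hj).2
        have e2 := (hfwd k hk).2
        rw [e1, e2, he] at h''
        omega
      · omega
    · exact h'
    · rcases hlex k j h' hj with h'' | ⟨-, h''⟩
      · have e1 := (hfwd j hj).2
        have e2 := (hfwd k hk).2
        rw [e1, e2, he] at h''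
        omega
      · omega
  have hgd : ∀ (l : List Int), l.length = vals.length → ∀ j, j < vals.length - 1 →
      (l.eraseIdx pos).getD j 0 = l.getD (if j < pos then j else j + 1) 0 := by
    intro l hl j hj
    have hlep : (l.eraseIdx pos).length = l.length - 1 := by
      rw [List.length_eraseIdx, if_pos (by omega)]
    rw [List.getD_eq_getElem _ _ (by omega), List.getElem_eraseIdx (by omega)]
    split
    · rw [List.getD_eq_getElem _ _ (by omega)]
    · rw [List.getD_eq_getElem _ _ (by omega)]
  have hvlen : (vals.eraseIdx pos).length = vals.length - 1 := by
    rw [List.length_eraseIdx, if_pos hpos]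
  have hilen : (idxs.eraseIdx pos).length = vals.length - 1 := by
    rw [List.length_eraseIdx, if_pos (by omega)]
    omega
  refine ⟨by omega, ?_, ?_, ?_, ?_, ?_⟩
  · rw [List.length_erase_of_mem hm, hvlen]
    omega
  · exact List.Pairwise.sublist List.erase_sublist hSp
  · intro k hk
    rw [hvlen] at hk
    rw [hgd vals rfl k hk, hgd idxs hlen k hk]
    have hj : (if k < pos then k else k + 1) < vals.length := by split <;> omega
    have hjne : (if k < pos then k else k + 1) ≠ pos := by split <;> omega
    obtain ⟨h1, h2⟩ := hfwd _ hj
    refine ⟨(hnd.mem_erase_iff).2 ⟨?_, h1⟩, h2⟩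
    intro he
    exact hjne (hinj _ pos hj hpos he)
  · intro i hi
    obtain ⟨hine, hiS⟩ := (hnd.mem_erase_iff).1 hi
    obtain ⟨k0, hk0, hk0e⟩ := honto i hiS
    have hk0p : k0 ≠ pos := by
      intro he
      exact hine (by rw [← hk0e, he])
    refine ⟨if k0 < pos then k0 else k0 - 1, ?_, ?_⟩
    · rw [hvlen]
      split <;> omega
    · by_cases hc : k0 < pos
      · rw [if_pos hc, hgd idxs hlen k0 (by omega), if_pos hc]
        exact hk0e
      · rw [if_neg hc, hgd idxs hlen (k0 - 1) (by omega), if_neg (by omega),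
          show k0 - 1 + 1 = k0 by omega]
        exact hk0e
  · intro j k hjk hk
    rw [hvlen] at hk
    rw [hgd vals rfl j (by omega), hgd vals rfl k hk, hgd idxs hlen j (by omega), hgd idxs hlen k hk]
    have h1 : (if j < pos then j else j + 1) < (if k < pos then k else k + 1) := by
      split <;> split <;> omega
    have h2 : (if k < pos then k else k + 1) < vals.length := by split <;> omega
    exact hlex _ _ h1 h2

lemma pv_mem_enumerate (xs : List Int) : ∀ (s i v : Int),
    ((i, v) ∈ PySem.List.enumerate xs s) ↔
      ∃ k : Nat, k < xs.length ∧ i = s + k ∧ xs.getD k 0 = v := by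
  induction xs with
  | nil =>
    intro s i v
    simp [PySem.List.enumerate]
  | cons a t ih =>
    intro s i v
    rw [PySem.List.enumerate_cons]
    simp only [List.mem_cons]
    constructor
    · rintro (he | hm)
      · rw [Prod.mk.injEq] at he
        exact ⟨0, by simp, by omega, by simp [he.2.symm]⟩
      · obtain ⟨k, hk, hi, hv⟩ := (ih (s + 1) i v).1 hm
        exact ⟨k + 1, by simp; omega, by push_cast; omega, by simpa using hv⟩
    · rintro ⟨k, hk, hi, hv⟩
      cases k with
      | zero =>
        left
        rw [Prod.mk.injEq]
        simp at hv
        exact ⟨by omega, hv.symm⟩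
      | succ k =>
        right
        refine (ih (s + 1) i v).2 ⟨k, by simp at hk; omega, by push_cast at hi ⊢; omega, by simpa using hv⟩

-- the comparison sorted2 uses for key (fst, snd), reverse = false
def pvLexB : (Int × Int) → (Int × Int) → Bool :=
  fun a b => decide (a.1 < b.1) || (!decide (b.1 < a.1) && decide (a.2 < b.2))

lemma pvLexB_iff (a b : Int × Int) : pvLexB a b = true ↔ (a.1 < b.1 ∨ (a.1 = b.1 ∧ a.2 < b.2)) := by
  simp [pvLexB]
  omega

lemma pvLexB_false_iff (a b : Int × Int) :
    pvLexB a b = false ↔ ¬(a.1 < b.1 ∨ (a.1 = b.1 ∧ a.2 < b.2)) := by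
  rw [← pvLexB_iff]
  simp

lemma pv_insertBy_pairwise (x : Int × Int) (ys : List (Int × Int))
    (hys : ys.Pairwise (fun a b => pvLexB b a = false)) :
    (PySem.List.insertBy pvLexB x ys).Pairwise (fun a b => pvLexB b a = false) := by
  induction ys with
  | nil => simp [PySem.List.insertBy]
  | cons y t ih =>
    rw [List.pairwise_cons] at hys
    obtain ⟨hy, ht⟩ := hys
    by_cases hc : pvLexB x y = true
    · rw [show PySem.List.insertBy pvLexB x (y :: t) = x :: y :: t by
        simp [PySem.List.insertBy, hc]]
      rw [List.pairwise_cons]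
      refine ⟨?_, List.pairwise_cons.2 ⟨hy, ht⟩⟩
      intro z hz
      rcases List.mem_cons.1 hz with rfl | hz'
      · rw [pvLexB_false_iff]
        rw [pvLexB_iff] at hc
        omega
      · have h1 := hy z hz'
        rw [pvLexB_false_iff] at h1 ⊢
        rw [pvLexB_iff] at hc
        omega
    · rw [show PySem.List.insertBy pvLexB x (y :: t) = y :: PySem.List.insertBy pvLexB x t by
        simp [PySem.List.insertBy, hc]]
      rw [List.pairwise_cons]
      refine ⟨?_, ih ht⟩
      intro z hz
      rcases (PySem.List.insertBy_mem_iff pvLexB x z t).1 hz with rfl | hz'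
      · simpa using hc
      · exact hy z hz'

lemma pv_foldl_insertBy_pairwise : ∀ (l acc : List (Int × Int)),
    acc.Pairwise (fun a b => pvLexB b a = false) →
    (l.foldl (fun acc x => PySem.List.insertBy pvLexB x acc) acc).Pairwise
      (fun a b => pvLexB b a = false) := by
  intro l
  induction l with
  | nil => intro acc h; simpa using h
  | cons x t ih =>
    intro acc h
    rw [List.foldl_cons]
    exact ih _ (pv_insertBy_pairwise x acc h)

lemma pv_sorted2_pairwise (E : List (Int × Int)) :
    (PySem.List.sorted2 E (fun t => t.1) (fun t => t.2)).Pairwise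
      (fun a b => pvLexB b a = false) := by
  have he : PySem.List.sorted2 E (fun t => t.1) (fun t => t.2) =
      E.foldl (fun acc x => PySem.List.insertBy pvLexB x acc) [] := rfl
  rw [he]
  exact pv_foldl_insertBy_pairwise E [] (by simp)

lemma pv_initInv (syn : List Int) :
    pvInv syn (PySem.List.pyRange 0 (syn.length : Int) 1)
      ((PySem.List.sorted2 ((PySem.List.enumerate syn).map (fun p => (p.2, p.1))) (fun t => t.1) (fun t => t.2)).map (fun t => t.1))
      ((PySem.List.sorted2 ((PySem.List.enumerate syn).map (fun p => (p.2, p.1))) (fun t => t.1) (fun t => t.2)).map (fun t => t.2)) := by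
  set E := (PySem.List.enumerate syn).map (fun p : Int × Int => (p.2, p.1)) with hE
  set pairs := PySem.List.sorted2 E (fun t => t.1) (fun t => t.2) with hpairs
  have hperm : pairs.Perm E := PySem.List.sorted2_perm E _ _ false
  have hlenE : E.length = syn.length := by
    rw [hE, List.length_map, PySem.List.length_enumerate]
  have hlenp : pairs.length = syn.length := by rw [hperm.length_eq, hlenE]
  have hmemE : ∀ v i : Int, ((v, i) ∈ E ↔ ∃ k : Nat, k < syn.length ∧ i = (k : Int) ∧ syn.getD k 0 = v) := by
    intro v i
    rw [hE, List.mem_map]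
    constructor
    · rintro ⟨⟨i', v'⟩, hm, he⟩
      rw [Prod.mk.injEq] at he
      obtain ⟨rfl, rfl⟩ := he
      obtain ⟨k, hk, hi, hv⟩ := (pv_mem_enumerate syn 0 i' v').1 hm
      exact ⟨k, hk, by omega, hv⟩
    · rintro ⟨k, hk, rfl, hv⟩
      exact ⟨((k : Int), v), (pv_mem_enumerate syn 0 _ _).2 ⟨k, hk, by omega, hv⟩, rfl⟩
  have hmemp : ∀ v i : Int, ((v, i) ∈ pairs ↔ ∃ k : Nat, k < syn.length ∧ i = (k : Int) ∧ syn.getD k 0 = v) := by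
    intro v i
    rw [hperm.mem_iff]
    exact hmemE v i
  have hpw := pv_sorted2_pairwise E
  rw [← hpairs] at hpw
  -- the second components of pairs are pairwise distinct
  have hsnd : (pairs.map (fun t : Int × Int => t.2)).Nodup := by
    have h1 : (E.map (fun t : Int × Int => t.2)).Nodup := by
      rw [hE, List.map_map]
      have : ((fun t : Int × Int => t.2) ∘ (fun p : Int × Int => (p.2, p.1))) =
          (fun p : Int × Int => p.1) := rfl
      rw [this, PySem.List.map_fst_enumerate]
      exact (PySem.List.pairwise_lt_pyRange_one 0 (0 + (syn.length : Int))).imp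
        (fun h => ne_of_lt h)
    exact ((hperm.map _).nodup_iff).2 h1
  have hvg : ∀ k (hk : k < pairs.length),
      (pairs.map (fun t : Int × Int => t.1)).getD k 0 = (pairs[k]'hk).1 := by
    intro k hk
    rw [List.getD_eq_getElem _ _ (by rw [List.length_map]; omega), List.getElem_map]
  have hig : ∀ k (hk : k < pairs.length),
      (pairs.map (fun t : Int × Int => t.2)).getD k 0 = (pairs[k]'hk).2 := by
    intro k hk
    rw [List.getD_eq_getElem _ _ (by rw [List.length_map]; omega), List.getElem_map]
  have hlenv : (pairs.map (fun t : Int × Int => t.1)).length = pairs.length := List.length_map ..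
  have hleni : (pairs.map (fun t : Int × Int => t.2)).length = pairs.length := List.length_map ..
  refine ⟨by rw [hlenv, hleni], ?_, PySem.List.pairwise_lt_pyRange_one 0 (syn.length : Int), ?_, ?_, ?_⟩
  · rw [hlenv, PySem.List.length_pyRange_one, hlenp]
    omega
  · -- forward
    intro k hk
    rw [hlenv] at hk
    rw [hvg k hk, hig k hk]
    have hmem : pairs[k]'(by omega) ∈ pairs := List.getElem_mem _
    obtain ⟨k0, hk0, hi, hv⟩ := (hmemp (pairs[k]'(by omega)).1 (pairs[k]'(by omega)).2).1 hmem
    constructor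
    · rw [PySem.List.mem_pyRange_one]
      omega
    · rw [hi]
      unfold pvG
      rw [PySem.List.pyGetD_natCast]
      exact hv.symm
  · -- onto
    intro i hi
    rw [PySem.List.mem_pyRange_one] at hi
    have hi0 : i = ((i.toNat : Nat) : Int) := by omega
    have hmem : (syn.getD i.toNat 0, i) ∈ pairs :=
      (hmemp _ i).2 ⟨i.toNat, by omega, by omega, rfl⟩
    obtain ⟨k, hklt, hke⟩ := List.mem_iff_getElem.1 hmem
    refine ⟨k, by omega, ?_⟩
    rw [hig k hklt, hke]
  · -- lexicographic sortedness
    intro j k hjk hk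
    rw [hlenv] at hk
    rw [hvg j (by omega), hvg k hk, hig j (by omega), hig k hk]
    have h1 : pvLexB (pairs[k]'(by omega)) (pairs[j]'(by omega)) = false := by
      have := List.pairwise_iff_getElem.1 hpw j k (by omega) (by omega) hjk
      exact this
    rw [pvLexB_false_iff] at h1
    have h2 : (pairs[j]'(by omega)).2 ≠ (pairs[k]'(by omega)).2 := by
      have := List.pairwise_iff_getElem.1 hsnd j k
        (by rw [hleni]; omega) (by rw [hleni]; omega) hjk
      simpa [List.getElem_map] using this
    omega

lemma pv_loop_eq (syn : List Int) :
    ∀ (marks S vals idxs out : List Int), pvInv syn S vals idxs → marks.length ≤ vals.length →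
    (marks.foldl
      (fun (st : List Int × List Int) value =>
        match PySem.List.min? st.1 (fun i => |PySem.List.pyGetD syn i 0 - value|) with
        | none => st
        | some min_index =>
          ((PySem.List.remove? st.1 min_index).getD st.1, st.2 ++ [min_index]))
      (S, out)).2 =
    (marks.foldl
      (fun (st : List Int × List Int × List Int) x =>
        let vals := st.1
        let idxs := st.2.1
        let p := PySem.List.bisectLeft vals x
        let pos :=
          if p = vals.length then PySem.List.bisectLeft vals (PySem.List.pyGetD vals (-1) 0)
          else if p = 0 then 0
          else
            let q := PySem.List.bisectLeft vals (vals.getD (p - 1) 0)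
            let dL := x - vals.getD q 0
            let dR := vals.getD p 0 - x
            if dL < dR ∨ (dL = dR ∧ idxs.getD q 0 < idxs.getD p 0) then q else p
        (vals.eraseIdx pos, idxs.eraseIdx pos, st.2.2 ++ [idxs.getD pos 0]))
      (vals, idxs, out)).2.2 := by
  intro marks
  induction marks with
  | nil => intro S vals idxs out _ _; rfl
  | cons x marks ih =>
    intro S vals idxs out hInv hlen'
    have hvne : vals ≠ [] := by
      intro h
      rw [h] at hlen'
      simp at hlen'
    obtain ⟨hlenIdx, hSlen, hSp, hfwd, honto, hlex⟩ := hInv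
    have hInv' : pvInv syn S vals idxs := ⟨hlenIdx, hSlen, hSp, hfwd, honto, hlex⟩
    have hvpos : 0 < vals.length := List.length_pos_iff.2 hvne
    obtain ⟨m, hm⟩ : ∃ m, PySem.List.min? S (fun i => |PySem.List.pyGetD syn i 0 - x|) = some m := by
      cases h : PySem.List.min? S (fun i => |PySem.List.pyGetD syn i 0 - x|) with
      | none =>
        rw [PySem.List.min?_eq_none_iff] at h
        rw [h] at hSlen
        simp at hSlen
        omega
      | some m => exact ⟨m, rfl⟩
    obtain ⟨hmS, hlexA⟩ := pv_min?_lex hSp hm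
    obtain ⟨hposlt, hargmin⟩ := pv_posB_spec syn S vals idxs x (pvPos vals idxs x) hInv' hvne rfl
    -- the two programs pick the same synapse index
    have him : idxs.getD (pvPos vals idxs x) 0 = m := by
      obtain ⟨hi0S, hi0v⟩ := hfwd (pvPos vals idxs x) hposlt
      obtain ⟨k, hk, hke⟩ := honto m hmS
      have hkv : vals.getD k 0 = pvG syn m := by rw [(hfwd k hk).2, hke]
      have h1 := hargmin k hk
      rw [hkv, hi0v, hke] at h1
      have h2 := hlexA (idxs.getD (pvPos vals idxs x) 0) hi0S
      unfold pvG at h1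
      set a1 := |PySem.List.pyGetD syn (idxs.getD (pvPos vals idxs x) 0) 0 - x| with ha1
      set a2 := |PySem.List.pyGetD syn m 0 - x| with ha2
      omega
    have hstepA : (fun (st : List Int × List Int) value =>
        match PySem.List.min? st.1 (fun i => |PySem.List.pyGetD syn i 0 - value|) with
        | none => st
        | some min_index =>
          ((PySem.List.remove? st.1 min_index).getD st.1, st.2 ++ [min_index]))
        (S, out) x = (S.erase m, out ++ [m]) := by
      simp only [hm, PySem.List.remove?_eq_some_erase S m hmS, Option.getD_some]
    have hstepB : (fun (st : List Int × List Int × List Int) x =>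
        let vals := st.1
        let idxs := st.2.1
        let p := PySem.List.bisectLeft vals x
        let pos :=
          if p = vals.length then PySem.List.bisectLeft vals (PySem.List.pyGetD vals (-1) 0)
          else if p = 0 then 0
          else
            let q := PySem.List.bisectLeft vals (vals.getD (p - 1) 0)
            let dL := x - vals.getD q 0
            let dR := vals.getD p 0 - x
            if dL < dR ∨ (dL = dR ∧ idxs.getD q 0 < idxs.getD p 0) then q else p
        (vals.eraseIdx pos, idxs.eraseIdx pos, st.2.2 ++ [idxs.getD pos 0]))
        (vals, idxs, out) x =
        (vals.eraseIdx (pvPos vals idxs x), idxs.eraseIdx (pvPos vals idxs x),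
          out ++ [idxs.getD (pvPos vals idxs x) 0]) := rfl
    have hInvNext : pvInv syn (S.erase m) (vals.eraseIdx (pvPos vals idxs x)) (idxs.eraseIdx (pvPos vals idxs x)) := by
      have := pvInv_preserved syn S vals idxs (pvPos vals idxs x) hInv' hposlt
      rw [him] at this
      exact this
    have hlen'' : marks.length ≤ (vals.eraseIdx (pvPos vals idxs x)).length := by
      rw [List.length_eraseIdx, if_pos hposlt]
      have : (x :: marks).length = marks.length + 1 := rfl
      omega
    have hB2 : (vals.eraseIdx (pvPos vals idxs x), idxs.eraseIdx (pvPos vals idxs x),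
        out ++ [idxs.getD (pvPos vals idxs x) 0]) =
        (vals.eraseIdx (pvPos vals idxs x), idxs.eraseIdx (pvPos vals idxs x), out ++ [m]) := by
      rw [him]
    have e1 : (List.foldl
        (fun (st : List Int × List Int) value =>
          match PySem.List.min? st.1 (fun i => |PySem.List.pyGetD syn i 0 - value|) with
          | none => st
          | some min_index =>
            ((PySem.List.remove? st.1 min_index).getD st.1, st.2 ++ [min_index]))
        (S, out) (x :: marks)).2 =
        (List.foldl
        (fun (st : List Int × List Int) value =>
          match PySem.List.min? st.1 (fun i => |PySem.List.pyGetD syn i 0 - value|) with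
          | none => st
          | some min_index =>
            ((PySem.List.remove? st.1 min_index).getD st.1, st.2 ++ [min_index]))
        (S.erase m, out ++ [m]) marks).2 := by
      have h := congrArg (fun z => (List.foldl
        (fun (st : List Int × List Int) value =>
          match PySem.List.min? st.1 (fun i => |PySem.List.pyGetD syn i 0 - value|) with
          | none => st
          | some min_index =>
            ((PySem.List.remove? st.1 min_index).getD st.1, st.2 ++ [min_index]))
        z marks).2) hstepA
      rw [List.foldl_cons]
      exact h
    have e2 : (List.foldl
        (fun (st : List Int × List Int × List Int) x =>
          let vals := st.1
          let idxs := st.2.1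
          let p := PySem.List.bisectLeft vals x
          let pos :=
            if p = vals.length then PySem.List.bisectLeft vals (PySem.List.pyGetD vals (-1) 0)
            else if p = 0 then 0
            else
              let q := PySem.List.bisectLeft vals (vals.getD (p - 1) 0)
              let dL := x - vals.getD q 0
              let dR := vals.getD p 0 - x
              if dL < dR ∨ (dL = dR ∧ idxs.getD q 0 < idxs.getD p 0) then q else p
          (vals.eraseIdx pos, idxs.eraseIdx pos, st.2.2 ++ [idxs.getD pos 0]))
        (vals, idxs, out) (x :: marks)).2.2 =
        (List.foldl
        (fun (st : List Int × List Int × List Int) x =>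
          let vals := st.1
          let idxs := st.2.1
          let p := PySem.List.bisectLeft vals x
          let pos :=
            if p = vals.length then PySem.List.bisectLeft vals (PySem.List.pyGetD vals (-1) 0)
            else if p = 0 then 0
            else
              let q := PySem.List.bisectLeft vals (vals.getD (p - 1) 0)
              let dL := x - vals.getD q 0
              let dR := vals.getD p 0 - x
              if dL < dR ∨ (dL = dR ∧ idxs.getD q 0 < idxs.getD p 0) then q else p
          (vals.eraseIdx pos, idxs.eraseIdx pos, st.2.2 ++ [idxs.getD pos 0]))
        (vals.eraseIdx (pvPos vals idxs x), idxs.eraseIdx (pvPos vals idxs x), out ++ [m]) marks).2.2 := by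
      have h := congrArg (fun z => (List.foldl
        (fun (st : List Int × List Int × List Int) x =>
          let vals := st.1
          let idxs := st.2.1
          let p := PySem.List.bisectLeft vals x
          let pos :=
            if p = vals.length then PySem.List.bisectLeft vals (PySem.List.pyGetD vals (-1) 0)
            else if p = 0 then 0
            else
              let q := PySem.List.bisectLeft vals (vals.getD (p - 1) 0)
              let dL := x - vals.getD q 0
              let dR := vals.getD p 0 - x
              if dL < dR ∨ (dL = dR ∧ idxs.getD q 0 < idxs.getD p 0) then q else p
          (vals.eraseIdx pos, idxs.eraseIdx pos, st.2.2 ++ [idxs.getD pos 0]))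
        z marks).2.2) (hstepB.trans hB2)
      rw [List.foldl_cons]
      exact h
    exact e1.trans ((ih (S.erase m) _ _ (out ++ [m]) hInvNext hlen'').trans e2.symm)

-- ===== VERDICT (by name: the statement is the Claim_ definition above) =====
theorem distance_synapse_mark_compare_py_spec : Claim_equal_distance_synapse_mark_compare_py := by
  intro syn marks _ hpre
  unfold Spec_distance_synapse_mark_compare_py
  unfold distance_synapse_mark_compare_py distance_synapse_mark_compare_py_alt
  have hinit := pv_initInv syn
  have hlen : marks.length ≤ ((PySem.List.sorted2 ((PySem.List.enumerate syn).map (fun p => (p.2, p.1))) (fun t => t.1) (fun t => t.2)).map (fun t => t.1)).length := by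
    rw [List.length_map,
      (PySem.List.sorted2_perm ((PySem.List.enumerate syn).map (fun p => (p.2, p.1))) (fun t => t.1) (fun t => t.2) false).length_eq,
      List.length_map, PySem.List.length_enumerate]
    exact hpre
  exact pv_loop_eq syn marks _ _ _ [] hinit hlen
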